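-- pv_equiv track=rewrite | github.com/HomericIntelligence/ProjectHephaestus | hephaestus/validation/markdown.py | count_markdown_issues
-- ===== SOURCE A (Python) =====
-- def _count_multiple_blank_lines(lines: list[str]) -> int:
--     """Count occurrences of multiple consecutive blank lines."""
--     count = 0
--     blank_count = 0
--     for line in lines:
--         if line.strip() == "":
--             blank_count += 1
--             if blank_count > 1:
--                 count += 1
--         else:
--             blank_count = 0
--     return count
--
-- def _count_missing_language_tags(lines: list[str]) -> int:
--     """Count code blocks without language tags."""
--     count = 0
--     in_code_block = False
--     for line in lines:
--         if line.strip().startswith("```"):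
--             if not in_code_block:
--                 if line.strip() == "```":
--                     count += 1
--                 in_code_block = True
--             else:
--                 in_code_block = False
--     return count
--
-- def count_markdown_issues(content: str) -> dict[str, int]:
--     """Count common markdown issues in content.
--
--     Args:
--         content: Markdown file content
--
--     Returns:
--         Dictionary of issue counts
--
--     """
--     lines = content.split("\n")
--
--     long_lines = sum(
--         1
--         for line in lines
--         if len(line) > 120 and not (line.strip().startswith("http") or line.strip().startswith("`"))
--     )
--     trailing_ws = sum(1 for line in lines if line and line != line.rstrip())
--
--     return {
--         "multiple_blank_lines": _count_multiple_blank_lines(lines),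
--         "missing_language_tags": _count_missing_language_tags(lines),
--         "long_lines": long_lines,
--         "trailing_whitespace": trailing_ws,
--     }
-- ===== SOURCE B (Python) =====
-- def count_markdown_issues(content: str) -> dict[str, int]:
--     """Count common markdown issues in content (stateless, comprehension-based)."""
--     lines = content.split("\n")
--     stripped = [ln.strip() for ln in lines]
--
--     # a "multiple blank lines" hit is exactly an adjacent pair of blank lines
--     multiple_blank = sum(1 for a, b in zip(stripped, stripped[1:]) if a == "" and b == "")
--
--     # fence lines alternate open/close; openers are the even-indexed fence lines
--     fences = [s for s in stripped if s.startswith("```")]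
--     missing = sum(1 for i, f in enumerate(fences) if i % 2 == 0 and f == "```")
--
--     long_lines = sum(
--         1
--         for ln, s in zip(lines, stripped)
--         if len(ln) > 120 and not (s.startswith("http") or s.startswith("`"))
--     )
--     trailing_ws = sum(1 for ln in lines if ln and ln != ln.rstrip())
--
--     return {
--         "multiple_blank_lines": multiple_blank,
--         "missing_language_tags": missing,
--         "long_lines": long_lines,
--         "trailing_whitespace": trailing_ws,
--     }
-- ===== Notes on version B (the rewrite author's own statement) =====
-- stated objective: alternative
-- what changed: Replaces A's two stateful accumulator scans by stateless characterisations: multiple blank lines counted as adjacent blank pairs via zip of the stripped lines with their tail, and missing language tags counted as the even-indexed (opening) entries of the filtered fence-line list that carry no tag; a precomputed stripped-lines list removes repeated strip() calls.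
import Mathlib
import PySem

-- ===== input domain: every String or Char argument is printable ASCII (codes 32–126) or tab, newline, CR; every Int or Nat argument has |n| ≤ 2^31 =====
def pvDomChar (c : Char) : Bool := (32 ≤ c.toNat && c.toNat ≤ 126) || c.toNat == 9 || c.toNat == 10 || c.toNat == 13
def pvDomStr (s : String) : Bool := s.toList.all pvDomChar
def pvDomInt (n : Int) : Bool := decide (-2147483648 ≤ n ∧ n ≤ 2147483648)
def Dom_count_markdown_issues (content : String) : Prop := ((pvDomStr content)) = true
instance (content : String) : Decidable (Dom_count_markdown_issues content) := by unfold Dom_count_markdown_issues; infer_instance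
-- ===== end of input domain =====

-- B replaces A's two stateful helper scans by stateless comprehensions (adjacent-pair zip
-- for blank runs, even-indexed fence lines for missing tags); objective: alternative.

-- ===== PORT A =====
def pvCountMultipleBlank (lines : List String) : Int :=
  (lines.foldl (fun (st : Int × Int) line =>
    if PySem.Str.strip line == "" then
      (if st.2 + 1 > 1 then st.1 + 1 else st.1, st.2 + 1)
    else (st.1, 0)) (0, 0)).1

def pvCountMissingTags (lines : List String) : Int :=
  (lines.foldl (fun (st : Int × Bool) line =>
    if PySem.Str.startswith (PySem.Str.strip line) "```" then
      if !st.2 then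
        (if PySem.Str.strip line == "```" then st.1 + 1 else st.1, true)
      else (st.1, false)
    else st) (0, false)).1

def count_markdown_issues (content : String) : List (String × Int) :=
  let lines := (PySem.Str.split? content "\n").getD []  -- sep "\n" ≠ "": split? is always some; getD is a totality guard
  let long_lines : Int := lines.foldl (fun acc line =>
    if PySem.Str.len line > 120 &&
       !(PySem.Str.startswith (PySem.Str.strip line) "http" ||
         PySem.Str.startswith (PySem.Str.strip line) "`") then acc + 1 else acc) 0
  let trailing_ws : Int := lines.foldl (fun acc line =>
    if line != "" && line != PySem.Str.rstrip line then acc + 1 else acc) 0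
  [("multiple_blank_lines", pvCountMultipleBlank lines),
   ("missing_language_tags", pvCountMissingTags lines),
   ("long_lines", long_lines),
   ("trailing_whitespace", trailing_ws)]

-- ===== PORT B =====
def count_markdown_issues_alt (content : String) : List (String × Int) :=
  let lines := (PySem.Str.split? content "\n").getD []  -- sep "\n" ≠ "": split? is always some; getD is a totality guard
  let stripped := lines.map PySem.Str.strip
  let multiple_blank : Int := (stripped.zip stripped.tail).foldl
    (fun acc p => if p.1 == "" && p.2 == "" then acc + 1 else acc) 0
  let fences := stripped.filter (fun s => PySem.Str.startswith s "```")
  let missing : Int := (PySem.List.enumerate fences).foldl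
    (fun acc p => if p.1 % 2 == 0 && p.2 == "```" then acc + 1 else acc) 0
  let long_lines : Int := (lines.zip stripped).foldl
    (fun acc p => if PySem.Str.len p.1 > 120 &&
       !(PySem.Str.startswith p.2 "http" || PySem.Str.startswith p.2 "`") then acc + 1 else acc) 0
  let trailing_ws : Int := lines.foldl (fun acc ln =>
    if ln != "" && ln != PySem.Str.rstrip ln then acc + 1 else acc) 0
  [("multiple_blank_lines", multiple_blank),
   ("missing_language_tags", missing),
   ("long_lines", long_lines),
   ("trailing_whitespace", trailing_ws)]

-- ===== PRECONDITION & SPEC =====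
def Spec_count_markdown_issues (content : String) (out : List (String × Int)) : Prop := out = count_markdown_issues_alt content
instance (content : String) (out : List (String × Int)) : Decidable (Spec_count_markdown_issues content out) := by unfold Spec_count_markdown_issues; infer_instance

-- ===== CLAIM (what is proved, stated in full; the proofs are below) =====
def Claim_equal_count_markdown_issues : Prop := ∀ (content : String), Dom_count_markdown_issues content → Spec_count_markdown_issues content (count_markdown_issues content)

-- ===== LEMMAS AND PROOFS =====

-- adjacent-pair characterisation of A's blank-run counter (on the stripped lines)
def pvPC (prev : Bool) : List String → Int
  | [] => 0
  | s :: ss => (if s == "" && prev then 1 else 0) + pvPC (s == "") ss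

-- alternating open/close characterisation of A's fence toggle (on the fence lines)
def pvGF : Bool → List String → Int
  | _, [] => 0
  | false, f :: fs => (if f == "```" then 1 else 0) + pvGF true fs
  | true, _ :: fs => pvGF false fs

theorem pv_mb_A (ls : List String) : ∀ (c bc : Int), 0 ≤ bc →
    (ls.foldl (fun (st : Int × Int) line =>
      if PySem.Str.strip line == "" then
        (if st.2 + 1 > 1 then st.1 + 1 else st.1, st.2 + 1)
      else (st.1, 0)) (c, bc)).1
    = c + pvPC (decide (1 ≤ bc)) (ls.map PySem.Str.strip) := by
  induction ls with
  | nil => intro c bc _; simp [pvPC]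
  | cons a ls ih =>
    intro c bc hbc
    by_cases h : PySem.Str.strip a == ""
    · simp only [List.foldl_cons, List.map_cons, h, if_true, pvPC]
      rw [ih _ (bc + 1) (by omega)]
      have h1 : decide (1 ≤ bc + 1) = true := by simp; omega
      rw [h1]
      by_cases h2 : (1 : Int) ≤ bc
      · have h3 : bc + 1 > 1 := by omega
        simp [h2, h3]; ring
      · have h3 : ¬ bc + 1 > 1 := by omega
        simp [h2, h3]
    · simp only [List.foldl_cons, List.map_cons, h, Bool.false_eq_true, if_false, pvPC]
      rw [ih _ 0 (by omega)]
      simp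

theorem pv_mb_B (ss : List String) : ∀ (a : String) (acc : Int),
    (((a :: ss).zip ss).foldl
      (fun acc p => if p.1 == "" && p.2 == "" then acc + 1 else acc) acc)
    = acc + pvPC (a == "") ss := by
  induction ss with
  | nil => intro a acc; simp [pvPC]
  | cons b t ih =>
    intro a acc
    simp only [List.zip_cons_cons, List.foldl_cons, pvPC]
    rw [ih b]
    by_cases ha : a == "" <;> by_cases hb : b == "" <;> simp [ha, hb] <;> ring

theorem pv_mt_A (ls : List String) : ∀ (c : Int) (inb : Bool),
    (ls.foldl (fun (st : Int × Bool) line =>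
      if PySem.Str.startswith (PySem.Str.strip line) "```" then
        if !st.2 then
          (if PySem.Str.strip line == "```" then st.1 + 1 else st.1, true)
        else (st.1, false)
      else st) (c, inb)).1
    = c + pvGF inb ((ls.map PySem.Str.strip).filter
        (fun s => PySem.Str.startswith s "```")) := by
  induction ls with
  | nil => intro c inb; simp [pvGF]
  | cons a ls ih =>
    intro c inb
    by_cases h : PySem.Str.startswith (PySem.Str.strip a) "```"
    · cases inb with
      | false =>
        simp only [List.foldl_cons, List.map_cons, List.filter_cons, h, if_true,
          Bool.not_false, pvGF]
        rw [ih _ true]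
        by_cases h2 : PySem.Str.strip a == "```" <;> simp [h2, pvGF] <;> try ring
      | true =>
        simp only [List.foldl_cons, List.map_cons, List.filter_cons, h, if_true,
          Bool.not_true, Bool.false_eq_true, if_false, pvGF]
        rw [ih _ false]
    · simp only [List.foldl_cons, List.map_cons, List.filter_cons, h,
        Bool.false_eq_true, if_false]
      rw [ih _ inb]

theorem pv_mt_B (fs : List String) : ∀ (k : Int) (acc : Int), 0 ≤ k →
    ((PySem.List.enumerate fs k).foldl
      (fun acc p => if p.1 % 2 == 0 && p.2 == "```" then acc + 1 else acc) acc)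
    = acc + (if k % 2 = 0 then pvGF false fs else pvGF true fs) := by
  induction fs with
  | nil => intro k acc _; simp [PySem.List.enumerate_nil, pvGF]
  | cons f fs ih =>
    intro k acc hk
    simp only [PySem.List.enumerate_cons, List.foldl_cons]
    rw [ih (k + 1) _ (by omega)]
    by_cases hp : k % 2 = 0
    · have hp1 : ¬ (k + 1) % 2 = 0 := by omega
      by_cases hf : f == "```" <;>
        simp [hp, hp1, hf, pvGF] <;> ring
    · have hp1 : (k + 1) % 2 = 0 := by omega
      by_cases hf : f == "```" <;>
        simp [hp, hp1, hf, pvGF]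

theorem pv_ll (ls : List String) : ∀ (acc : Int),
    ((ls.zip (ls.map PySem.Str.strip)).foldl
      (fun acc p => if PySem.Str.len p.1 > 120 &&
         !(PySem.Str.startswith p.2 "http" || PySem.Str.startswith p.2 "`")
       then acc + 1 else acc) acc)
    = ls.foldl (fun acc line =>
        if PySem.Str.len line > 120 &&
           !(PySem.Str.startswith (PySem.Str.strip line) "http" ||
             PySem.Str.startswith (PySem.Str.strip line) "`")
        then acc + 1 else acc) acc := by
  induction ls with
  | nil => intro acc; rfl
  | cons a ls ih =>
    intro acc
    simp only [List.map_cons, List.zip_cons_cons, List.foldl_cons]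
    exact ih _

-- ===== VERDICT (by name: the statement is the Claim_ definition above) =====
theorem count_markdown_issues_spec : Claim_equal_count_markdown_issues := by
  intro content _
  unfold Spec_count_markdown_issues count_markdown_issues count_markdown_issues_alt
    pvCountMultipleBlank pvCountMissingTags
  generalize ((PySem.Str.split? content "\n").getD []) = lines
  have h1 : (lines.foldl (fun (st : Int × Int) line =>
      if PySem.Str.strip line == "" then
        (if st.2 + 1 > 1 then st.1 + 1 else st.1, st.2 + 1)
      else (st.1, 0)) (0, 0)).1
      = ((lines.map PySem.Str.strip).zip (lines.map PySem.Str.strip).tail).foldl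
        (fun acc p => if p.1 == "" && p.2 == "" then acc + 1 else acc) 0 := by
    rw [pv_mb_A lines 0 0 le_rfl]
    cases hl : lines.map PySem.Str.strip with
    | nil => simp [pvPC]
    | cons a ss =>
      rw [List.tail_cons, pv_mb_B ss a 0]
      simp [pvPC]
  have h2 : (lines.foldl (fun (st : Int × Bool) line =>
      if PySem.Str.startswith (PySem.Str.strip line) "```" then
        if !st.2 then
          (if PySem.Str.strip line == "```" then st.1 + 1 else st.1, true)
        else (st.1, false)
      else st) (0, false)).1
      = (PySem.List.enumerate ((lines.map PySem.Str.strip).filter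
          (fun s => PySem.Str.startswith s "```")) 0).foldl
        (fun acc p => if p.1 % 2 == 0 && p.2 == "```" then acc + 1 else acc) 0 := by
    rw [pv_mt_A lines 0 false, pv_mt_B _ 0 0 le_rfl]
    norm_num
  simp only [h1, h2, pv_ll]
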